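-- pv_equiv track=rewrite | github.com/prempyla/collabrate- | min_cost_climb_stairs.py | f
-- ===== SOURCE A (Python) =====
-- def f(ind, cost):
--     if ind == len(cost)-1:
--         return 0
--
--     oneJump=0
--     twoJump=0
--
--     if ind < len(cost):
--         oneJump = abs(cost[ind]) + f(ind+1, cost)
--     if ind+1 < len(cost):
--         twoJump = abs(cost[ind+1]) + f(ind+2, cost)
--
--     return min(oneJump,twoJump)
-- ===== SOURCE B (Python) =====
-- def f(ind, cost):
--     n = len(cost)
--     if ind >= n - 1:
--         return 0
--     dp2 = 0  # min cost starting at i + 2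
--     dp1 = 0  # min cost starting at i + 1
--     i = n - 2
--     while i >= ind:
--         cur = min(abs(cost[i]) + dp1, abs(cost[i + 1]) + dp2)
--         dp2, dp1 = dp1, cur
--         i -= 1
--     return dp1
-- ===== Notes on version B (the rewrite author's own statement) =====
-- stated objective: alternative
-- what changed: Replaces A's two-branch recursion over stair indices with a bottom-up two-variable DP loop running once from the top stair down to ind.
import Mathlib
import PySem

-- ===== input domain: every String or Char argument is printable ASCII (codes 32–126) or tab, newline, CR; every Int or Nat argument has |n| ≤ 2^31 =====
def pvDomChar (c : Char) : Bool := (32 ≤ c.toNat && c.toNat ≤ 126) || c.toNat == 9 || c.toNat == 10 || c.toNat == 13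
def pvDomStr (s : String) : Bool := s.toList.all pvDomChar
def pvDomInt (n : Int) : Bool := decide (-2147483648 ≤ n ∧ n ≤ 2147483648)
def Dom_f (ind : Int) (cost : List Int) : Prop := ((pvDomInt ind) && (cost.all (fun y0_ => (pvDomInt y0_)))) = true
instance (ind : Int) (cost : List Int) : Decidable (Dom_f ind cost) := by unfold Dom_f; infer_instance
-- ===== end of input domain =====

-- B replaces A's two-branch recursion with a bottom-up two-variable DP loop; return value only.

-- ===== PORT A =====
-- literal port of A; cost[i] is pyGet? (Python indexing, negative wraparound); the .getD 0
-- only fills the IndexError case, which Pre_f excludes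
def f (ind : Int) (cost : List Int) : Int :=
  if ind = (cost.length : Int) - 1 then 0
  else
    let oneJump : Int :=
      if _h : ind < (cost.length : Int) then
        |((PySem.List.pyGet? cost ind).getD 0)| + f (ind + 1) cost
      else 0
    let twoJump : Int :=
      if _h : ind + 1 < (cost.length : Int) then
        |((PySem.List.pyGet? cost (ind + 1)).getD 0)| + f (ind + 2) cost
      else 0
    min oneJump twoJump
termination_by ((cost.length : Int) - ind).toNat
decreasing_by all_goals omega

-- ===== PORT B =====
-- the while loop of Source B: i runs from cost.length-2 down to ind, state (dp2, dp1)
def fAltLoop (cost : List Int) (ind : Int) (i : Int) (dp2 dp1 : Int) : Int :=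
  if _h : ind ≤ i then
    fAltLoop cost ind (i - 1) dp1
      (min (|((PySem.List.pyGet? cost i).getD 0)| + dp1)
           (|((PySem.List.pyGet? cost (i + 1)).getD 0)| + dp2))
  else dp1
termination_by (i - ind + 1).toNat
decreasing_by omega

def f_alt (ind : Int) (cost : List Int) : Int :=
  if (cost.length : Int) - 1 ≤ ind then 0
  else fAltLoop cost ind ((cost.length : Int) - 2) 0 0

-- ===== PRECONDITION & SPEC =====
-- Pre_f excludes exactly the inputs where A raises IndexError: ind below -len(cost)
-- (except ind = -1 on the empty list, where A returns 0 at once — the second disjunct keeps it in).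
def Pre_f (ind : Int) (cost : List Int) : Prop :=
  -(cost.length : Int) ≤ ind ∨ ind = (cost.length : Int) - 1
instance (ind : Int) (cost : List Int) : Decidable (Pre_f ind cost) := by unfold Pre_f; infer_instance

def pvWitness_f : Int × List Int := (0, [10, 15, 20])

def Spec_f (ind : Int) (cost : List Int) (out : Int) : Prop := out = f_alt ind cost
instance (ind : Int) (cost : List Int) (out : Int) : Decidable (Spec_f ind cost out) := by unfold Spec_f; infer_instance

-- ===== CLAIM (what is proved, stated in full; the proofs are below) =====
def Claim_equal_f : Prop := ∀ (ind : Int) (cost : List Int), Dom_f ind cost → Pre_f ind cost → Spec_f ind cost (f ind cost)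

-- ===== LEMMAS AND PROOFS =====

-- A returns 0 at or above the top stair
lemma f_ge (ind : Int) (cost : List Int) (h : (cost.length : Int) - 1 ≤ ind) : f ind cost = 0 := by
  rw [f]
  by_cases h1 : ind = (cost.length : Int) - 1
  · simp [h1]
  · have h2 : ¬ ind < (cost.length : Int) := by omega
    have h3 : ¬ ind + 1 < (cost.length : Int) := by omega
    simp [h1, h2, h3]

-- the recurrence A satisfies strictly below the top stair
lemma f_step (k : Int) (cost : List Int) (_h1 : -(cost.length : Int) ≤ k)
    (h2 : k ≤ (cost.length : Int) - 2) :
    f k cost = min (|((PySem.List.pyGet? cost k).getD 0)| + f (k + 1) cost)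
                   (|((PySem.List.pyGet? cost (k + 1)).getD 0)| + f (k + 2) cost) := by
  rw [f]
  have hne : ¬ k = (cost.length : Int) - 1 := by omega
  have ha : k < (cost.length : Int) := by omega
  have hb : k + 1 < (cost.length : Int) := by omega
  simp [hne, ha, hb]

-- loop invariant: with the two state cells holding f (i+2) and f (i+1), the loop computes f ind
lemma loop_eq (cost : List Int) (ind : Int) (hpre : -(cost.length : Int) ≤ ind) :
    ∀ (m : Nat) (i : Int), (i - ind + 1).toNat = m → ind - 1 ≤ i → i ≤ (cost.length : Int) - 2 →
      fAltLoop cost ind i (f (i + 2) cost) (f (i + 1) cost) = f ind cost := by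
  intro m
  induction m with
  | zero =>
    intro i hm hlo hhi
    have hi : i = ind - 1 := by omega
    rw [fAltLoop]
    have hlt : ¬ ind ≤ i := by omega
    simp only [hlt, dif_neg, not_false_iff]
    simp [hi]
  | succ m ih =>
    intro i hm hlo hhi
    by_cases hge : ind ≤ i
    · rw [fAltLoop]
      simp only [hge, dif_pos]
      have hmin : min (|((PySem.List.pyGet? cost i).getD 0)| + f (i + 1) cost)
          (|((PySem.List.pyGet? cost (i + 1)).getD 0)| + f (i + 2) cost) = f i cost :=
        (f_step i cost (by omega) hhi).symm
      rw [hmin]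
      have h1 : i - 1 + 2 = i + 1 := by ring
      have h2 : i - 1 + 1 = i := by ring
      have := ih (i - 1) (by omega) (by omega) (by omega)
      rw [h1, h2] at this
      exact this
    · rw [fAltLoop]
      have hi : i = ind - 1 := by omega
      simp [hi]

-- ===== VERDICT (by name: the statement is the Claim_ definition above) =====
theorem f_spec : Claim_equal_f := by
  intro ind cost _ hpre
  unfold Spec_f f_alt
  by_cases htop : (cost.length : Int) - 1 ≤ ind
  · simp [htop, f_ge ind cost htop]
  · have hlo : -(cost.length : Int) ≤ ind := by
      rcases hpre with h | h
      · exact h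
      · omega
    simp only [htop, if_false]
    have h2 : ((cost.length : Int) - 2) + 2 = (cost.length : Int) := by ring
    have h1 : ((cost.length : Int) - 2) + 1 = (cost.length : Int) - 1 := by ring
    have hz2 : f ((cost.length : Int) - 2 + 2) cost = 0 := by rw [h2]; exact f_ge _ _ (by omega)
    have hz1 : f ((cost.length : Int) - 2 + 1) cost = 0 := by rw [h1]; exact f_ge _ _ (by omega)
    have := loop_eq cost ind hlo (((cost.length : Int) - 2) - ind + 1).toNat
      ((cost.length : Int) - 2) rfl (by omega) (by omega)
    rw [hz2, hz1] at this
    exact this.symm
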